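-- pv_equiv track=rewrite | github.com/boxu0001/practice | py3/AWS_10_scoreRanks.py | getNumOfPassed
-- ===== SOURCE A (Python) =====
-- def getNumOfPassed(cutoffRank: int, num: int, scores: list[int]) -> int:
--     scores = sorted(scores)
--     curScore=-1
--     curNumber=1
--     curRank=0
--     result=0
--     for sc in scores[::-1]:
--         if sc == curScore:
--             curNumber+=1
--         else:
--             curScore = sc
--             curRank += curNumber
--             curNumber=1
--
--         if curRank <= cutoffRank and sc > 0:
--             result+=1
--         else:
--             break
--
--     return result
-- ===== SOURCE B (Python) =====
-- def getNumOfPassed(cutoffRank: int, num: int, scores: list[int]) -> int: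
--     pos = sorted(x for x in scores if x > 0)
--     if cutoffRank <= 0:
--         return 0
--     if cutoffRank >= len(pos):
--         return len(pos)
--     t = pos[len(pos) - cutoffRank]
--     return sum(1 for x in pos if x >= t)
-- ===== Notes on version B (the rewrite author's own statement) =====
-- stated objective: alternative
-- what changed: A walks the sorted scores descending maintaining a competition-rank state machine with an early break; B instead sorts only the positive scores, picks the cutoffRank-th largest as a threshold, and counts the elements >= that threshold (order-statistic formulation, no rank bookkeeping).
import Mathlib
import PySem

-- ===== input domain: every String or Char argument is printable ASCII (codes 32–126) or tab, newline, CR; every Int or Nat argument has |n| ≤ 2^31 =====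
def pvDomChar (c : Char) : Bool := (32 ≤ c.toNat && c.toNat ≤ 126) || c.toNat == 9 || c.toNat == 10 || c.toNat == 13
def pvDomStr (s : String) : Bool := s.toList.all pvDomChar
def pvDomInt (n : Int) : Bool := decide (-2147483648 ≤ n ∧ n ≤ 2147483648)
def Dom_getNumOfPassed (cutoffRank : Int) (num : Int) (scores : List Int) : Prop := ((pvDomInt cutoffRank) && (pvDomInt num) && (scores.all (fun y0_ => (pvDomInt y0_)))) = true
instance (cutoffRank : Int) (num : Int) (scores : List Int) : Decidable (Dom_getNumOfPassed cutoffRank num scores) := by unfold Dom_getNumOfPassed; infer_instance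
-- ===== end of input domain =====

-- B replaces A's descending competition-rank state machine by an order-statistic
-- threshold (cutoffRank-th largest positive score) and a count; same cost class.

-- ===== PORT A =====
-- the for-loop of A: state (curScore, curNumber, curRank, result); 'break' = return result
def getNumOfPassedLoop (cutoffRank : Int) : List Int → Int → Int → Int → Int → Int
  | [], _curScore, _curNumber, _curRank, result => result
  | sc :: rest, curScore, curNumber, curRank, result =>
    if sc = curScore then
      -- curNumber += 1; then the rank test
      if curRank ≤ cutoffRank ∧ 0 < sc then
        getNumOfPassedLoop cutoffRank rest curScore (curNumber + 1) curRank (result + 1)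
      else result
    else
      -- curScore = sc; curRank += curNumber; curNumber = 1; then the rank test
      if curRank + curNumber ≤ cutoffRank ∧ 0 < sc then
        getNumOfPassedLoop cutoffRank rest sc 1 (curRank + curNumber) (result + 1)
      else result

def getNumOfPassed (cutoffRank : Int) (num : Int) (scores : List Int) : Int :=
  -- scores = sorted(scores); for sc in scores[::-1]: … (a step -1 slice never raises, hence .getD [])
  getNumOfPassedLoop cutoffRank
    ((PySem.List.slice? (PySem.List.sorted scores (fun x => x) false) none none (-1)).getD [])
    (-1) 1 0 0

-- ===== PORT B =====
def getNumOfPassed_alt (cutoffRank : Int) (num : Int) (scores : List Int) : Int :=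
  let pos := PySem.List.sorted (scores.filter (fun x => decide (0 < x))) (fun x => x) false
  if cutoffRank ≤ 0 then 0
  else if (pos.length : Int) ≤ cutoffRank then (pos.length : Int)
  else
    -- pos[len(pos) - cutoffRank]: with 0 < cutoffRank < len(pos) this index is in range, so .getD is never taken
    let t := (PySem.List.pyGet? pos ((pos.length : Int) - cutoffRank)).getD 0
    (pos.countP (fun x => decide (t ≤ x)) : Int)

-- ===== PRECONDITION & SPEC =====
def Spec_getNumOfPassed (cutoffRank : Int) (num : Int) (scores : List Int) (out : Int) : Prop := out = getNumOfPassed_alt cutoffRank num scores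
instance (cutoffRank : Int) (num : Int) (scores : List Int) (out : Int) : Decidable (Spec_getNumOfPassed cutoffRank num scores out) := by unfold Spec_getNumOfPassed; infer_instance

-- ===== CLAIM (what is proved, stated in full; the proofs are below) =====
def Claim_equal_getNumOfPassed : Prop := ∀ (cutoffRank : Int) (num : Int) (scores : List Int), Dom_getNumOfPassed cutoffRank num scores → Spec_getNumOfPassed cutoffRank num scores (getNumOfPassed cutoffRank num scores)

-- ===== LEMMAS AND PROOFS =====

-- pvGc scores x = number of scores strictly greater than x; pvP = "x passes":
-- both programs return (scores.countP (pvP cutoffRank scores) : Int).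
def pvGc (scores : List Int) (x : Int) : Int := (scores.countP (fun y => decide (x < y)) : Int)

def pvP (cutoffRank : Int) (scores : List Int) (x : Int) : Bool :=
  decide (0 < x) && decide (pvGc scores x < cutoffRank)

theorem pvGc_nonneg (scores : List Int) (x : Int) : 0 ≤ pvGc scores x := by
  simp [pvGc]

theorem pvGc_antitone (scores : List Int) {x y : Int} (h : x ≤ y) :
    pvGc scores y ≤ pvGc scores x := by
  unfold pvGc
  exact_mod_cast List.countP_mono_left (fun a _ hya => by
    simp only [decide_eq_true_iff] at *; omega)

theorem pv_countP_split (P : List Int) (cs : Int) (h : ∀ x ∈ P, cs ≤ x) :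
    P.countP (fun y => decide (cs < y)) + P.countP (fun y => decide (y = cs)) = P.length := by
  induction P with
  | nil => simp
  | cons a P ih =>
    have h1 := h a (List.mem_cons_self ..)
    have h2 := ih (fun x hx => h x (List.mem_cons_of_mem _ hx))
    by_cases ha : cs < a
    · have : ¬ (a = cs) := by omega
      simp [List.countP_cons, ha, this]; omega
    · have : a = cs := by omega
      simp [List.countP_cons, ha, this]; omega

theorem loopA_spec (cutoffRank : Int) (scores L : List Int)
    (hperm : L.Perm scores) (hsort : L.Pairwise (fun a b => b ≤ a)) :
    ∀ (R P : List Int) (cs cn cr res : Int),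
    L = P ++ R →
    ((P = [] ∧ cs = -1 ∧ cn = 1 ∧ cr = 0) ∨
     (cs ∈ P ∧ (∀ x ∈ P, cs ≤ x) ∧ cn = (P.countP (fun y => decide (y = cs)) : Int)
        ∧ cr = pvGc scores cs + 1)) →
    getNumOfPassedLoop cutoffRank R cs cn cr res = res + (R.countP (pvP cutoffRank scores) : Int) := by
  intro R
  induction R with
  | nil => intro P cs cn cr res _ _; simp [getNumOfPassedLoop]
  | cons sc R' ih =>
    intro P cs cn cr res hL hinv
    have hsplit := List.pairwise_append.mp (hL ▸ hsort)
    have hsep : ∀ x ∈ P, ∀ y ∈ sc :: R', y ≤ x := hsplit.2.2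
    have htail : ∀ y ∈ R', y ≤ sc := (List.pairwise_cons.mp hsplit.2.1).1
    have hgc : ∀ x : Int, pvGc scores x
        = ((P.countP (fun y => decide (x < y)) : Int)
          + ((sc :: R').countP (fun y => decide (x < y)) : Int)) := by
      intro x
      unfold pvGc
      rw [← hperm.countP_eq, hL, List.countP_append]
      push_cast; ring
    have hgeP : ∀ x ∈ P, sc ≤ x := fun x hx => hsep x hx sc (List.mem_cons_self ..)
    -- the degenerate first step: P = [] and sc = -1 hits the 'sc == curScore' branch and breaks
    by_cases hdeg : P = [] ∧ sc = cs ∧ cs = -1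
    · obtain ⟨hP0, hsc, hcs⟩ := hdeg
      have hns : ¬ (0 < sc) := by omega
      have hz : (sc :: R').countP (pvP cutoffRank scores) = 0 := by
        rw [List.countP_eq_zero]
        intro y hy
        have : y ≤ sc := by
          rcases List.mem_cons.mp hy with h | h
          · omega
          · exact htail y h
        simp only [pvP, Bool.and_eq_true, decide_eq_true_iff, not_and]
        intro h0; omega
      have hnc : ¬ (cr ≤ cutoffRank ∧ 0 < sc) := by omega
      simp only [getNumOfPassedLoop]
      rw [if_pos hsc, if_neg hnc, hz]
      simp
    -- general step: the updated rank equals pvGc scores sc + 1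
    have hkey : (if sc = cs then cr else cr + cn) = pvGc scores sc + 1 ∧
                (if sc = cs then cn + 1 else 1)
                  = (((P ++ [sc]).countP (fun y => decide (y = sc)) : Nat) : Int) := by
      have hscR : (sc :: R').countP (fun y => decide (sc < y)) = 0 := by
        rw [List.countP_eq_zero]
        intro y hy
        have : y ≤ sc := by
          rcases List.mem_cons.mp hy with h | h
          · omega
          · exact htail y h
        simp only [decide_eq_true_iff]; omega
      rcases hinv with ⟨hP0, hcs, hcn, hcr⟩ | ⟨hcsP, hge, hcn, hcr⟩
      · -- P = []: sc ≠ cs (else degenerate), newRank = 0 + 1, pvGc sc = 0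
        have hne : ¬ (sc = cs) := fun h => hdeg ⟨hP0, h, hcs⟩
        have : pvGc scores sc = 0 := by
          rw [hgc sc, hP0, hscR]; simp
        subst hP0
        simp [hne, hcn, hcr, this, List.countP_cons]
      · by_cases hsc : sc = cs
        · subst hsc
          constructor
          · simp [hcr]
          · rw [hcn, List.countP_append]
            simp
        · have hlt : sc < cs := by
            have := hgeP cs hcsP
            omega
          have hgcs : pvGc scores sc = (P.length : Int) := by
            rw [hgc sc, hscR]
            have hful : P.countP (fun y => decide (sc < y)) = P.length := by
              rw [List.countP_eq_length]
              intro a ha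
              have := hge a ha
              simp only [decide_eq_true_iff]; omega
            rw [hful]; simp
          have hgcc : pvGc scores cs
              = (P.countP (fun y => decide (cs < y)) : Int) := by
            rw [hgc cs]
            have h0 : (sc :: R').countP (fun y => decide (cs < y)) = 0 := by
              rw [List.countP_eq_zero]
              intro y hy
              have : y ≤ sc := by
                rcases List.mem_cons.mp hy with h | h
                · omega
                · exact htail y h
              simp only [decide_eq_true_iff]; omega
            rw [h0]; simp
          have hsplitP := pv_countP_split P cs hge
          constructor
          · rw [if_neg hsc, hcr, hcn, hgcs, hgcc]
            have hle1 : P.countP (fun y => decide (cs < y)) ≤ P.length := List.countP_le_length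
            have hle2 : P.countP (fun y => decide (y = cs)) ≤ P.length := List.countP_le_length
            omega
          · rw [if_neg hsc, List.countP_append]
            have : P.countP (fun y => decide (y = sc)) = 0 := by
              rw [List.countP_eq_zero]
              intro a ha
              have := hge a ha
              simp only [decide_eq_true_iff]; omega
            simp [this]
    obtain ⟨hkr, hkn⟩ := hkey
    by_cases hcond : (if sc = cs then cr else cr + cn) ≤ cutoffRank ∧ 0 < sc
    · -- continue: sc passes
      have hpsc : pvP cutoffRank scores sc = true := by
        simp only [pvP, Bool.and_eq_true, decide_eq_true_iff]
        omega
      have hstep : getNumOfPassedLoop cutoffRank (sc :: R') cs cn cr res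
          = getNumOfPassedLoop cutoffRank R' sc (if sc = cs then cn + 1 else 1)
              (if sc = cs then cr else cr + cn) (res + 1) := by
        obtain ⟨h1, h2⟩ := hcond
        by_cases hsc : sc = cs
        · rw [if_pos hsc] at h1
          rw [hsc] at h2
          simp [getNumOfPassedLoop, hsc, h1, h2]
        · rw [if_neg hsc] at h1
          simp [getNumOfPassedLoop, hsc, h1, h2]
      rw [hstep, hkr, hkn]
      rw [ih (P ++ [sc]) sc _ _ (res + 1) (by rw [hL]; simp) (Or.inr ⟨by simp,
        fun x hx => by
          rcases List.mem_append.mp hx with h | h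
          · exact hgeP x h
          · simp at h; omega,
        rfl, rfl⟩)]
      rw [List.countP_cons, hpsc]
      simp
      omega
    · -- break: sc and everything after it fails
      have hz : (sc :: R').countP (pvP cutoffRank scores) = 0 := by
        rw [List.countP_eq_zero]
        intro y hy
        have hysc : y ≤ sc := by
          rcases List.mem_cons.mp hy with h | h
          · omega
          · exact htail y h
        simp only [pvP, Bool.and_eq_true, decide_eq_true_iff, not_and]
        intro h0
        have hfail : cutoffRank < pvGc scores sc + 1 ∨ sc ≤ 0 := by
          rw [← hkr]; omega
        rcases hfail with h | h
        · have := pvGc_antitone scores hysc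
          omega
        · omega
      have hret : getNumOfPassedLoop cutoffRank (sc :: R') cs cn cr res = res := by
        by_cases hsc : sc = cs
        · rw [if_pos hsc] at hcond
          rw [hsc] at hcond
          simp [getNumOfPassedLoop, hsc, hcond]
        · rw [if_neg hsc] at hcond
          simp [getNumOfPassedLoop, hsc, hcond]
      rw [hret, hz]; simp

theorem A_eq_countP (c num : Int) (scores : List Int) :
    getNumOfPassed c num scores = (scores.countP (pvP c scores) : Int) := by
  unfold getNumOfPassed
  rw [PySem.List.slice?_none_none_neg_one]
  have hperm : ((PySem.List.sorted scores (fun x => x) false).reverse).Perm scores :=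
    (List.reverse_perm _).trans (PySem.List.sorted_perm ..)
  have hsort : ((PySem.List.sorted scores (fun x => x) false).reverse).Pairwise
      (fun a b => b ≤ a) := by
    rw [List.pairwise_reverse]
    exact PySem.List.sorted_pairwise ..
  have := loopA_spec c scores _ hperm hsort
    ((PySem.List.sorted scores (fun x => x) false).reverse) [] (-1) 1 0 0 rfl
    (Or.inl ⟨rfl, rfl, rfl, rfl⟩)
  rw [Option.getD_some, this, hperm.countP_eq]
  ring

theorem alt_eq_countP (c num : Int) (scores : List Int) :
    getNumOfPassed_alt c num scores = (scores.countP (pvP c scores) : Int) := by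
  simp only [getNumOfPassed_alt]
  set pos := PySem.List.sorted (scores.filter (fun x => decide (0 < x))) (fun x => x) false
    with hposdef
  have hperm : pos.Perm (scores.filter (fun x => decide (0 < x))) := PySem.List.sorted_perm ..
  have hmempos : ∀ x ∈ pos, 0 < x := by
    intro x hx
    have hmf := hperm.mem_iff.mp hx
    rw [List.mem_filter] at hmf
    simpa using hmf.2
  have hsorted : pos.Pairwise (fun a b => a ≤ b) := PySem.List.sorted_pairwise ..
  have hgcpos : ∀ x : Int, 0 < x →
      pvGc scores x = (pos.countP (fun y => decide (x < y)) : Int) := by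
    intro x hx
    unfold pvGc
    rw [hperm.countP_eq, List.countP_filter]
    congr 1
    apply List.countP_congr
    intro a _
    simp only [Bool.and_eq_true, decide_eq_true_iff]
    omega
  by_cases h1 : c ≤ 0
  · rw [if_pos h1]
    have hz : scores.countP (pvP c scores) = 0 := by
      rw [List.countP_eq_zero]
      intro y _
      simp only [pvP, Bool.and_eq_true, decide_eq_true_iff, not_and]
      intro _
      have := pvGc_nonneg scores y
      omega
    rw [hz]; simp
  · rw [if_neg h1]
    by_cases h2 : (pos.length : Int) ≤ c
    · rw [if_pos h2]
      have key : ∀ x ∈ scores, 0 < x → pvGc scores x < c := by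
        intro x hx hxpos
        have hxpos' : x ∈ pos :=
          hperm.mem_iff.mpr (List.mem_filter.mpr ⟨hx, by simpa using hxpos⟩)
        have hsplitlen := List.length_eq_countP_add_countP
          (l := pos) (fun y => decide (x < y))
        have hone : 0 < pos.countP (fun y => decide (¬ (decide (x < y)) = true)) := by
          rw [List.countP_pos_iff]
          exact ⟨x, hxpos', by simp⟩
        rw [hgcpos x hxpos]
        omega
      have hcong : scores.countP (pvP c scores) = scores.countP (fun x => decide (0 < x)) := by
        apply List.countP_congr
        intro x hx
        simp only [pvP, Bool.and_eq_true, decide_eq_true_iff]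
        constructor
        · exact fun h => h.1
        · exact fun h => ⟨h, key x hx h⟩
      rw [hcong, List.countP_eq_length_filter]
      exact_mod_cast hperm.length_eq
    · rw [if_neg h2]
      have hc0 : 0 < c := by omega
      have hkn : c.toNat < pos.length := by omega
      set k := pos.length - c.toNat with hkdef
      have hk : k < pos.length := by omega
      have hidx : ((pos.length : Int) - c) = (k : Int) := by omega
      rw [hidx, PySem.List.pyGet?_natCast, List.getElem?_eq_getElem hk, Option.getD_some]
      set t := pos[k] with htdef
      have htpos : 0 < t := hmempos t (List.getElem_mem _)
      have hmono := List.pairwise_iff_getElem.mp hsorted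
      have htake : (pos.take (k+1)).countP (fun y => decide (t < y)) = 0 := by
        rw [List.countP_eq_zero]
        intro a ha
        rw [List.mem_take_iff_getElem] at ha
        obtain ⟨i, hi, hai⟩ := ha
        subst hai
        simp only [decide_eq_true_iff]
        rcases Nat.lt_or_ge i k with h | h
        · exact not_lt.mpr (by rw [htdef]; exact hmono i k (by omega) hk h)
        · have hik : i = k := by omega
          subst hik
          exact not_lt.mpr (le_of_eq htdef.symm)
      have hgct : pvGc scores t < c := by
        rw [hgcpos t htpos]
        have hsp : pos.countP (fun y => decide (t < y))
            = (pos.take (k+1)).countP (fun y => decide (t < y))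
              + (pos.drop (k+1)).countP (fun y => decide (t < y)) := by
          rw [← List.countP_append, List.take_append_drop]
        have hle := List.countP_le_length
          (l := pos.drop (k+1)) (p := fun y => decide (t < y))
        have hln : (pos.drop (k+1)).length = pos.length - (k+1) := List.length_drop
        rw [hsp, htake]
        omega
      have hdrop : pos.drop k = t :: pos.drop (k+1) := List.drop_eq_getElem_cons hk
      have hpd : (pos.drop k).Pairwise (fun a b => a ≤ b) :=
        List.Pairwise.sublist (List.drop_sublist ..) hsorted
      have hdropge : ∀ y ∈ pos.drop (k+1), t ≤ y := by
        rw [hdrop] at hpd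
        exact (List.pairwise_cons.mp hpd).1
      have hlow : ∀ x : Int, x < t → c ≤ pvGc scores x := by
        intro x hxt
        have hcnt : (pos.drop k).countP (fun y => decide (x < y)) = (pos.drop k).length := by
          rw [List.countP_eq_length]
          intro a ha
          rw [hdrop] at ha
          simp only [decide_eq_true_iff]
          rcases List.mem_cons.mp ha with h | h
          · omega
          · have := hdropge a h
            omega
        have hsplit2 : pos.countP (fun y => decide (x < y))
            = (pos.take k).countP (fun y => decide (x < y))
              + (pos.drop k).countP (fun y => decide (x < y)) := by
          rw [← List.countP_append, List.take_append_drop]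
        have hlendrop : (pos.drop k).length = c.toNat := by
          rw [List.length_drop]; omega
        have hgeq : pos.countP (fun y => decide (x < y))
            ≤ scores.countP (fun y => decide (x < y)) := by
          rw [hperm.countP_eq, List.countP_filter]
          apply List.countP_mono_left
          intro a _ h
          simp only [Bool.and_eq_true, decide_eq_true_iff] at h ⊢
          exact h.1
        unfold pvGc
        omega
      have hfin : scores.countP (pvP c scores) = pos.countP (fun y => decide (t ≤ y)) := by
        rw [hperm.countP_eq, List.countP_filter]
        apply List.countP_congr
        intro x _
        simp only [pvP, Bool.and_eq_true, decide_eq_true_iff]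
        constructor
        · rintro ⟨hx0, hgc⟩
          refine ⟨?_, hx0⟩
          by_contra hxt
          have := hlow x (by omega)
          omega
        · rintro ⟨hts, hx0⟩
          refine ⟨hx0, ?_⟩
          have := pvGc_antitone scores hts
          omega
      rw [hfin]

-- ===== VERDICT (by name: the statement is the Claim_ definition above) =====
theorem getNumOfPassed_spec : Claim_equal_getNumOfPassed := by
  intro c num scores _
  unfold Spec_getNumOfPassed
  rw [A_eq_countP c num scores, alt_eq_countP c num scores]
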